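-- pv_equiv track=rewrite | github.com/sasageneus/voyage | lib.py | minimaze
-- ===== SOURCE A (Python) =====
-- def min_and_penalty(row):
--     m = None
--     p = None
--     for dist in row:
--         if dist != None:
--             if m == None or dist < m:
--                 p = m
--                 m = dist
--             elif p == None or dist < p:
--                 p = dist
--     assert(m != None)
--     #assert(p != None)
--     return m, p if p else 0
--
-- def minimaze(row):
--     min_dist, penalty = min_and_penalty(row)
--     if min_dist > 0:
--         for i in range(len(row)):
--             if row[i] != None:
--                 row[i] -= min_dist
--         penalty -= min_dist
--     return min_dist, penalty
-- ===== SOURCE B (Python) =====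
-- def minimaze(row):
--     # Sort the non-None entries and read the smallest / second-smallest off the
--     # front, instead of A's single-pass min/second-min scan.  Same in-place
--     # subtraction of the minimum as A.
--     vals = [d for d in row if d is not None]
--     assert vals
--     s = sorted(vals)
--     m = s[0]
--     p = s[1] if len(s) > 1 else None
--     penalty = p if p else 0
--     if m > 0:
--         for i in range(len(row)):
--             if row[i] is not None:
--                 row[i] -= m
--         penalty -= m
--     return m, penalty
-- ===== Notes on version B (the rewrite author's own statement) =====
-- stated objective: simpler
-- what changed: Replaces the single-pass min/second-min state machine with filtering out None, sorting, and reading the two smallest values off the front of the sorted list.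
import Mathlib
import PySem

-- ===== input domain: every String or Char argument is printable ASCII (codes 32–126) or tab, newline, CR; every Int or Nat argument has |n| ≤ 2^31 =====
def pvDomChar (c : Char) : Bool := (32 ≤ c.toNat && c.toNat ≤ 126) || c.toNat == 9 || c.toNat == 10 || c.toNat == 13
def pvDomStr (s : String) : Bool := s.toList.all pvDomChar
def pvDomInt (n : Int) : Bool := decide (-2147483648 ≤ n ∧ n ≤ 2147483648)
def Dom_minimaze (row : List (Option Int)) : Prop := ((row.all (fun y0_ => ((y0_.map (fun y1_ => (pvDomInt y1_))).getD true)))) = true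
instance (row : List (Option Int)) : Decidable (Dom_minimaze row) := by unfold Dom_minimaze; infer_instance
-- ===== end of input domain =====

-- B sorts the non-None entries and reads the two smallest off the front instead of A's
-- single-pass min/second-min scan (objective: simpler). Both Pythons subtract the minimum
-- from `row` in place identically; the theorems here are about the RETURN value.

-- ===== PORT A =====

-- one iteration of A's min/second-min loop body, for a non-None dist d
def pvIns2 (mp : Option Int × Option Int) (d : Int) : Option Int × Option Int :=
  match mp with
  | (none, _) => (some d, none)            -- m == None: p = m (= None), m = dist
  | (some m, p) =>
    if d < m then (some d, some m)         -- dist < m: p = m, m = dist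
    else
      match p with
      | none => (some m, some d)           -- p == None: p = dist
      | some q => if d < q then (some m, some d) else (some m, some q)

def pvMinAndPenalty (row : List (Option Int)) : Int × Int :=
  let mp := row.foldl (fun mp dist =>
    match dist with
    | none => mp
    | some d => pvIns2 mp d) (none, none)
  -- assert(m != None): Pre_minimaze excludes the rows where it fails; .getD 0 is never read there
  (mp.1.getD 0, match mp.2 with | none => 0 | some q => if q = 0 then 0 else q)  -- p if p else 0

def minimaze (row : List (Option Int)) : Int × Int :=
  let md := pvMinAndPenalty row
  if md.1 > 0 then (md.1, md.2 - md.1) else (md.1, md.2)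

-- ===== PORT B =====
def minimaze_alt (row : List (Option Int)) : Int × Int :=
  let s := PySem.List.sorted (row.filterMap id) (fun x => x) false
  match s with
  | [] => (0, 0)                           -- assert vals: excluded by Pre_minimaze
  | m :: rest =>
    let p : Option Int := match rest with | [] => none | q :: _ => some q
    let penalty : Int := match p with | none => 0 | some q => if q = 0 then 0 else q
    if m > 0 then (m, penalty - m) else (m, penalty)

-- ===== PRECONDITION & SPEC =====
-- Pre_ excludes rows with no non-None entry, on which both A and B raise AssertionError.
def Pre_minimaze (row : List (Option Int)) : Prop := ∃ x ∈ row, x.isSome = true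
instance (row : List (Option Int)) : Decidable (Pre_minimaze row) := by unfold Pre_minimaze; infer_instance

def pvWitness_minimaze : List (Option Int) := [some 3, none, some 1, some 2]

def Spec_minimaze (row : List (Option Int)) (out : Int × Int) : Prop := out = minimaze_alt row
instance (row : List (Option Int)) (out : Int × Int) : Decidable (Spec_minimaze row out) := by unfold Spec_minimaze; infer_instance

-- ===== CLAIM (what is proved, stated in full; the proofs are below) =====
def Claim_equal_minimaze : Prop := ∀ (row : List (Option Int)), Dom_minimaze row → Pre_minimaze row → Spec_minimaze row (minimaze row)

-- ===== LEMMAS AND PROOFS =====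

-- the first two elements of a list, as options
def pvFirst2 (s : List Int) : Option Int × Option Int :=
  match s with
  | [] => (none, none)
  | [a] => (some a, none)
  | a :: b :: _ => (some a, some b)

-- skipping None in A's loop is folding pvIns2 over the non-None values
theorem pvFoldl_filterMap (row : List (Option Int)) (init : Option Int × Option Int) :
    row.foldl (fun mp dist => match dist with | none => mp | some d => pvIns2 mp d) init
      = (row.filterMap id).foldl pvIns2 init := by
  induction row generalizing init with
  | nil => rfl
  | cons x xs ih => cases x <;> simp [ih]

-- inserting d into s changes the first two elements exactly as one step of A's scan
theorem pvFirst2_insertBy (s : List Int) (d : Int) :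
    pvFirst2 (PySem.List.insertBy (fun a b => decide (a < b)) d s) = pvIns2 (pvFirst2 s) d := by
  match s with
  | [] => rfl
  | [a] =>
    simp only [PySem.List.insertBy, pvFirst2, pvIns2]
    by_cases h : d < a <;> simp [h]
  | a :: b :: t =>
    simp only [PySem.List.insertBy, pvFirst2, pvIns2]
    by_cases h1 : d < a
    · simp [h1]
    · by_cases h2 : d < b <;> simp [h1, h2]

-- the insertion-sort fold tracks A's scan through pvFirst2
theorem pvFirst2_foldl (l : List Int) (s : List Int) :
    pvFirst2 (l.foldl (fun acc x => PySem.List.insertBy (fun a b => decide (a < b)) x acc) s)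
      = l.foldl pvIns2 (pvFirst2 s) := by
  induction l generalizing s with
  | nil => rfl
  | cons x xs ih => simp only [List.foldl_cons, ih, pvFirst2_insertBy]

theorem pvFirst2_sorted (l : List Int) :
    pvFirst2 (PySem.List.sorted l (fun x => x) false) = l.foldl pvIns2 (none, none) := by
  rw [PySem.List.sorted_eq_foldl_insertBy]
  exact pvFirst2_foldl l []

-- ===== VERDICT (by name: the statement is the Claim_ definition above) =====
theorem minimaze_spec : Claim_equal_minimaze := by
  intro row _ hpre
  unfold Spec_minimaze minimaze minimaze_alt pvMinAndPenalty
  rw [pvFoldl_filterMap, ← pvFirst2_sorted]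
  have hne : PySem.List.sorted (row.filterMap id) (fun x => x) false ≠ [] := by
    rw [Ne, PySem.List.sorted_eq_nil_iff]
    obtain ⟨x, hx, hs⟩ := hpre
    cases x with
    | none => simp at hs
    | some v =>
      intro h
      have : v ∈ row.filterMap id := List.mem_filterMap.mpr ⟨some v, hx, rfl⟩
      rw [h] at this
      simp at this
  match h : PySem.List.sorted (row.filterMap id) (fun x => x) false with
  | [] => exact absurd h hne
  | [a] => simp [pvFirst2]
  | a :: b :: t => simp [pvFirst2]
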